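-- pv_equiv track=rewrite | github.com/esmaiyigunler/ortakKarakterKonumu | dosyadaOrtakKarakterBulma.py | karakterKoordinatlariniBul
-- ===== SOURCE A (Python) =====
-- def karakterKoordinatlariniBul(dosya1Icerigi, dosya2Icerigi):
--     dosya1Koordinatlari = {}
--     dosya2Koordinatlari = {}
--
--     for indeks, karakter in enumerate(dosya1Icerigi):
--         if karakter not in dosya1Koordinatlari:
--             dosya1Koordinatlari[karakter] = []
--         dosya1Koordinatlari[karakter].append(indeks)
--
--     for indeks, karakter in enumerate(dosya2Icerigi):
--         if karakter not in dosya2Koordinatlari: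
--             dosya2Koordinatlari[karakter] = []
--         dosya2Koordinatlari[karakter].append(indeks)
--
--     ortakKoordinatlar = {}
--     for karakter in dosya1Koordinatlari:
--         if karakter in dosya2Koordinatlari:
--             ortakKoordinatlar[karakter] = {
--                 "dosya1 Koordinatlari": dosya1Koordinatlari[karakter],
--                 "dosya2 Koordinatlari": dosya2Koordinatlari[karakter]
--             }
--     return ortakKoordinatlar
-- ===== SOURCE B (Python) =====
-- def karakterKoordinatlariniBul(dosya1Icerigi, dosya2Icerigi):
--     dosya2Karakterleri = set(dosya2Icerigi)
--     ortakKoordinatlar = {}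
--     for karakter in dosya1Icerigi:
--         if karakter in dosya2Karakterleri and karakter not in ortakKoordinatlar:
--             ortakKoordinatlar[karakter] = {
--                 "dosya1 Koordinatlari": [i for i, c in enumerate(dosya1Icerigi) if c == karakter],
--                 "dosya2 Koordinatlari": [i for i, c in enumerate(dosya2Icerigi) if c == karakter],
--             }
--     return ortakKoordinatlar
-- ===== Notes on version B (the rewrite author's own statement) =====
-- stated objective: simpler
-- what changed: Instead of prebuilding a position index dict for each string and intersecting their key sets in a third loop, B walks string 1 once keeping a set of string 2's characters, and for each new common character computes both position lists directly by an enumerate comprehension over each string.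
import Mathlib
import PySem

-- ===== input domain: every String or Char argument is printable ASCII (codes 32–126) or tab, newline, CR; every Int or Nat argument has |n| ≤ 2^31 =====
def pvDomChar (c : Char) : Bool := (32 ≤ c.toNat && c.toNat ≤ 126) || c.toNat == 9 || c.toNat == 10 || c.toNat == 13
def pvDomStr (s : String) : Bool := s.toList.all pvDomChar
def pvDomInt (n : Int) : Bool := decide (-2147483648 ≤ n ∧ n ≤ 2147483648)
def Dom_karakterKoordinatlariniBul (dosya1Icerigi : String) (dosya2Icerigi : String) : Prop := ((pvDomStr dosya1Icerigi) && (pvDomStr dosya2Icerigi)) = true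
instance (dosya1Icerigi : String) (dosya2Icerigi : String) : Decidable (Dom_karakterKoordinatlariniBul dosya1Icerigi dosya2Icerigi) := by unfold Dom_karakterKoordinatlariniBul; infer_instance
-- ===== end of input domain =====

-- B replaces A's two prebuilt position-index dicts plus key-intersection loop by a single walk of
-- string 1 against a set of string 2's characters, recomputing each common character's position
-- lists by an enumerate scan (objective: simpler).

-- ===== PORT A =====
-- loop body of A's first two loops: if karakter not in d: d[karakter] = []; d[karakter].append(indeks)
def pvAdim (d : PySem.Dict String (List Int)) (p : Int × Char) : PySem.Dict String (List Int) :=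
  let k := String.singleton p.2
  let d := if d.contains k = false then d.insert k ([] : List Int) else d
  d.insert k (d.getD k [] ++ [p.1])

-- the first two loops of A: map each character (a 1-char string) to its index list
def pvKoordinatDict (s : String) : PySem.Dict String (List Int) :=
  (PySem.List.enumerate s.toList 0).foldl pvAdim PySem.Dict.empty

def karakterKoordinatlariniBul (dosya1Icerigi : String) (dosya2Icerigi : String) : List (String × List (String × List Int)) :=
  let dosya1Koordinatlari := pvKoordinatDict dosya1Icerigi
  let dosya2Koordinatlari := pvKoordinatDict dosya2Icerigi
  let ortakKoordinatlar :=
    dosya1Koordinatlari.keys.foldl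
      (fun o k =>
        if dosya2Koordinatlari.contains k then
          o.insert k [("dosya1 Koordinatlari", dosya1Koordinatlari.getD k []),
                      ("dosya2 Koordinatlari", dosya2Koordinatlari.getD k [])]
        else o)
      PySem.Dict.empty
  ortakKoordinatlar.items

-- ===== PORT B =====
-- [i for i, c in enumerate(s) if c == karakter]
def pvKonumlar (l : List Char) (c : Char) : List Int :=
  (PySem.List.enumerate l 0).filterMap (fun p => if p.2 = c then some p.1 else none)

def karakterKoordinatlariniBul_alt (dosya1Icerigi : String) (dosya2Icerigi : String) : List (String × List (String × List Int)) :=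
  let l1 := dosya1Icerigi.toList
  let l2 := dosya2Icerigi.toList
  let dosya2Karakterleri : PySem.Set Char := PySem.Set.ofList l2
  let ortakKoordinatlar :=
    l1.foldl
      (fun o c =>
        if PySem.Set.contains dosya2Karakterleri c && !o.contains (String.singleton c) then
          o.insert (String.singleton c)
            [("dosya1 Koordinatlari", pvKonumlar l1 c),
             ("dosya2 Koordinatlari", pvKonumlar l2 c)]
        else o)
      (PySem.Dict.empty : PySem.Dict String (List (String × List Int)))
  ortakKoordinatlar.items

-- ===== PRECONDITION & SPEC =====
def Spec_karakterKoordinatlariniBul (dosya1Icerigi : String) (dosya2Icerigi : String) (out : List (String × List (String × List Int))) : Prop := out = karakterKoordinatlariniBul_alt dosya1Icerigi dosya2Icerigi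
instance (dosya1Icerigi : String) (dosya2Icerigi : String) (out : List (String × List (String × List Int))) : Decidable (Spec_karakterKoordinatlariniBul dosya1Icerigi dosya2Icerigi out) := by unfold Spec_karakterKoordinatlariniBul; infer_instance

-- ===== CLAIM (what is proved, stated in full; the proofs are below) =====
def Claim_equal_karakterKoordinatlariniBul : Prop := ∀ (dosya1Icerigi : String) (dosya2Icerigi : String), Dom_karakterKoordinatlariniBul dosya1Icerigi dosya2Icerigi → Spec_karakterKoordinatlariniBul dosya1Icerigi dosya2Icerigi (karakterKoordinatlariniBul dosya1Icerigi dosya2Icerigi)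

-- ===== LEMMAS AND PROOFS =====

theorem pvSing_inj {a b : Char} : String.singleton a = String.singleton b ↔ a = b := by
  constructor
  · intro h
    have := congrArg String.toList h
    simpa [String.singleton] using this
  · intro h; rw [h]

theorem pvKeys_pvAdim (d : PySem.Dict String (List Int)) (p : Int × Char) :
    (pvAdim d p).keys = PySem.Set.add d.keys (String.singleton p.2) := by
  unfold pvAdim
  by_cases h : d.contains (String.singleton p.2) = false
  · have hk : String.singleton p.2 ∉ d.keys := by
      have := PySem.Dict.contains_eq_decide_mem_keys d (String.singleton p.2)
      rw [h] at this
      simpa using this.symm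
    simp only [h, if_true]
    rw [PySem.Dict.keys_insert_of_contains _ _ (by
      rw [PySem.Dict.contains_insert]; simp)]
    rw [PySem.Dict.keys_insert_of_not_contains d _ h]
    simp [PySem.Set.add, hk]
  · have h' : d.contains (String.singleton p.2) = true := by
      cases hh : d.contains (String.singleton p.2)
      · exact absurd hh h
      · rfl
    have hk : String.singleton p.2 ∈ d.keys := by
      have := PySem.Dict.contains_eq_decide_mem_keys d (String.singleton p.2)
      rw [h'] at this
      simpa using this.symm
    simp only [h', Bool.true_eq_false, if_false]
    rw [PySem.Dict.keys_insert_of_contains _ _ h']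
    simp [PySem.Set.add, hk]

theorem pvGetD_pvAdim (d : PySem.Dict String (List Int)) (p : Int × Char) (c : Char) :
    (pvAdim d p).getD (String.singleton c) [] =
      if p.2 = c then d.getD (String.singleton c) [] ++ [p.1]
      else d.getD (String.singleton c) [] := by
  unfold pvAdim
  have hgetk : (if d.contains (String.singleton p.2) = false
      then d.insert (String.singleton p.2) ([] : List Int) else d).getD (String.singleton p.2) []
      = d.getD (String.singleton p.2) [] := by
    by_cases h : d.contains (String.singleton p.2) = false
    · simp only [h, if_true]
      rw [PySem.Dict.getD_insert_self, PySem.Dict.getD_of_not_contains d _ h]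
    · simp [h]
  by_cases hc : p.2 = c
  · subst hc
    rw [if_pos rfl, PySem.Dict.getD_insert_self, hgetk]
  · have hne : String.singleton c ≠ String.singleton p.2 := fun h => hc (pvSing_inj.mp h).symm
    rw [if_neg hc, PySem.Dict.getD_insert_of_ne _ _ _ hne]
    by_cases h : d.contains (String.singleton p.2) = false
    · simp only [h, if_true]
      rw [PySem.Dict.getD_insert_of_ne _ _ _ hne]
    · simp [h]

theorem pvGetD_A (l : List (Int × Char)) : ∀ (d : PySem.Dict String (List Int)) (c : Char),
    (l.foldl pvAdim d).getD (String.singleton c) []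
    = d.getD (String.singleton c) [] ++ (l.filter (fun p => p.2 == c)).map (·.1) := by
  induction l with
  | nil => intro d c; simp
  | cons p t ih =>
    intro d c
    simp only [List.foldl_cons, List.filter_cons]
    rw [ih, pvGetD_pvAdim]
    by_cases hc : p.2 = c
    · simp [hc]
    · simp [hc, beq_eq_false_iff_ne.mpr hc]

theorem pvKeys_A (l : List (Int × Char)) : ∀ (d : PySem.Dict String (List Int)),
    (l.foldl pvAdim d).keys
    = (l.map (fun p => String.singleton p.2)).foldl PySem.Set.add d.keys := by
  induction l with
  | nil => intro d; simp
  | cons p t ih =>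
    intro d
    simp only [List.foldl_cons, List.map_cons]
    rw [ih, pvKeys_pvAdim]

theorem pvFoldlAdd_map {α β : Type} [DecidableEq α] [DecidableEq β] (f : α → β)
    (hf : Function.Injective f) (l : List α) :
    ∀ (s : List α), (l.map f).foldl PySem.Set.add (s.map f) = (l.foldl PySem.Set.add s).map f := by
  induction l with
  | nil => intro s; simp
  | cons c t ih =>
    intro s
    simp only [List.map_cons, List.foldl_cons]
    have hadd : PySem.Set.add (s.map f) (f c) = (PySem.Set.add s c).map f := by
      by_cases h : c ∈ s
      · simp [PySem.Set.add, h, List.mem_map, hf.eq_iff]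
      · simp [PySem.Set.add, h, List.mem_map, hf.eq_iff]
    rw [hadd, ih]

theorem pvOrtak_A {V : Type} (cond : String → Bool) (val : String → V) :
    ∀ (ks : List String) (o : PySem.Dict String V), ks.Nodup →
    (∀ k ∈ ks, o.contains k = false) →
    (ks.foldl (fun o k => if cond k then o.insert k (val k) else o) o).items
      = o.items ++ (ks.filter cond).map (fun k => (k, val k)) := by
  intro ks
  induction ks with
  | nil => intro o _ _; simp
  | cons k ks ih =>
    intro o hnd hfresh
    simp only [List.foldl_cons, List.filter_cons]
    by_cases hc : cond k
    · rw [if_pos hc, if_pos hc]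
      rw [ih (o.insert k (val k)) (List.nodup_cons.mp hnd).2
        (by
          intro k' hk'
          rw [PySem.Dict.contains_insert]
          have hne : k' ≠ k := fun h => (List.nodup_cons.mp hnd).1 (h ▸ hk')
          simp [hne, hfresh k' (List.mem_cons_of_mem _ hk')])]
      rw [PySem.Dict.items_insert_of_not_contains o (val k) (hfresh k List.mem_cons_self)]
      simp
    · rw [if_neg hc, if_neg hc]
      exact ih o (List.nodup_cons.mp hnd).2 (fun k' hk' => hfresh k' (List.mem_cons_of_mem _ hk'))

def pvPick (cond : Char → Bool) : List Char → List Char → List Char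
  | _, [] => []
  | seen, c :: t =>
    if cond c && !seen.contains c then c :: pvPick cond (c :: seen) t
    else pvPick cond seen t

theorem pvB_items {V : Type} (cond : Char → Bool) (val : Char → V) :
    ∀ (l : List Char) (o : PySem.Dict String V) (seen : List Char), o.keys.Nodup →
    (∀ c : Char, o.contains (String.singleton c) = seen.contains c) →
    (l.foldl
      (fun o c =>
        if cond c && !o.contains (String.singleton c) then
          o.insert (String.singleton c) (val c)
        else o) o).items
      = o.items ++ (pvPick cond seen l).map (fun c => (String.singleton c, val c)) := by
  intro l
  induction l with
  | nil => intro o seen _ _; simp [pvPick]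
  | cons c t ih =>
    intro o seen hnd hcont
    simp only [List.foldl_cons, pvPick]
    rw [hcont c]
    by_cases hc : (cond c && !seen.contains c) = true
    · rw [if_pos hc, if_pos hc]
      have hfresh : o.contains (String.singleton c) = false := by
        rcases Bool.and_eq_true .. |>.mp hc with ⟨_, h2⟩
        rw [hcont c]; exact Bool.not_eq_true' .. |>.mp h2
      rw [ih (o.insert (String.singleton c) (val c)) (c :: seen)
        (PySem.Dict.nodup_keys_insert _ _ _ hnd)
        (by
          intro c'
          rw [PySem.Dict.contains_insert, hcont c', List.contains_cons]
          by_cases h : c' = c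
          · simp [h]
          · have : (String.singleton c' == String.singleton c) = false := by
              simp only [beq_eq_false_iff_ne, ne_eq]
              intro hh
              exact h (pvSing_inj.mp hh)
            simp [this, h]
          )]
      rw [PySem.Dict.items_insert_of_not_contains o (val c) hfresh]
      simp
    · rw [if_neg hc, if_neg hc]
      exact ih o seen hnd hcont

theorem pvFoldlAdd_prefix (l : List Char) : ∀ (s : List Char), ∃ t, l.foldl PySem.Set.add s = s ++ t := by
  induction l with
  | nil => intro s; exact ⟨[], by simp⟩
  | cons c l ih =>
    intro s
    simp only [List.foldl_cons]
    rcases ih (PySem.Set.add s c) with ⟨t, ht⟩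
    by_cases h : c ∈ s
    · exact ⟨t, by simpa [PySem.Set.add, h] using ht⟩
    · exact ⟨c :: t, by simpa [PySem.Set.add, h] using ht⟩

theorem pvPick_eq (cond : Char → Bool) :
    ∀ (l : List Char) (seen1 seen2 : List Char),
    (∀ c, cond c = true → (c ∈ seen1 ↔ c ∈ seen2)) →
    pvPick cond seen1 l = ((l.foldl PySem.Set.add seen2).drop seen2.length).filter cond := by
  intro l
  induction l with
  | nil => intro s1 s2 _; simp [pvPick]
  | cons c t ih =>
  intro s1 s2 hagree
  simp only [List.foldl_cons, pvPick]
  by_cases hmem : c ∈ s2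
  · have hadd : PySem.Set.add s2 c = s2 := by simp [PySem.Set.add, hmem]
    rw [hadd]
    have hskip : (cond c && !s1.contains c) = false := by
      by_cases hcnd : cond c = true
      · have : c ∈ s1 := (hagree c hcnd).mpr hmem
        simp [hcnd, this]
      · simp [Bool.not_eq_true _ |>.mp hcnd]
    rw [hskip]
    simp only [Bool.false_eq_true, if_false]
    exact ih s1 s2 hagree
  · have hadd : PySem.Set.add s2 c = s2 ++ [c] := by simp [PySem.Set.add, hmem]
    rw [hadd]
    rcases pvFoldlAdd_prefix t (s2 ++ [c]) with ⟨ext, hext⟩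
    have hdrop1 : (t.foldl PySem.Set.add (s2 ++ [c])).drop s2.length = c :: ext := by
      rw [hext, List.append_assoc, List.drop_left]; rfl
    have hdrop2 : (t.foldl PySem.Set.add (s2 ++ [c])).drop (s2 ++ [c]).length = ext := by
      rw [hext, List.drop_left]
    rw [hdrop1, List.filter_cons]
    by_cases hcnd : cond c = true
    · have hs1 : c ∉ s1 := fun h => hmem ((hagree c hcnd).mp h)
      rw [if_pos (by simp [hcnd, hs1])]
      simp only [hcnd, if_true]
      congr 1
      rw [ih (c :: s1) (s2 ++ [c]) (by
        intro c' hc'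
        simp only [List.mem_cons, List.mem_append, List.not_mem_nil, or_false]
        by_cases h : c' = c
        · simp [h]
        · simp [h, hagree c' hc'])]
      rw [hdrop2]
    · have hcf : cond c = false := Bool.not_eq_true _ |>.mp hcnd
      rw [if_neg (by simp [hcf]), hcf]
      simp only [Bool.false_eq_true, if_false]
      rw [ih s1 (s2 ++ [c]) (by
        intro c' hc'
        have h : c' ≠ c := fun hh => by rw [hh, hcf] at hc'; exact Bool.false_ne_true hc'
        simp [List.mem_append, h, hagree c' hc'])]
      rw [hdrop2]

theorem pvKonumlar_eq (l : List Char) (c : Char) :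
    pvKonumlar l c = ((PySem.List.enumerate l 0).filter (fun p => p.2 == c)).map (·.1) := by
  unfold pvKonumlar
  induction (PySem.List.enumerate l 0) with
  | nil => rfl
  | cons p t ih =>
    by_cases h : p.2 = c <;> simp [h, ih]

theorem pvSing_injective : Function.Injective String.singleton := fun _ _ h => pvSing_inj.mp h

-- keys of A's index dict, closed form
theorem pvKoordinatDict_keys (s : String) :
    (pvKoordinatDict s).keys = (PySem.Set.ofList s.toList).map String.singleton := by
  unfold pvKoordinatDict
  rw [pvKeys_A, PySem.Dict.keys_empty]
  have hmap : (PySem.List.enumerate s.toList 0).map (fun p => String.singleton p.2)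
      = s.toList.map String.singleton := by
    have := PySem.List.map_snd_enumerate s.toList 0
    calc (PySem.List.enumerate s.toList 0).map (fun p => String.singleton p.2)
        = ((PySem.List.enumerate s.toList 0).map (fun p => p.2)).map String.singleton := by
          rw [List.map_map]; rfl
      _ = s.toList.map String.singleton := by rw [this]
  rw [hmap]
  have := pvFoldlAdd_map String.singleton pvSing_injective s.toList []
  simpa [PySem.Set.ofList_eq_foldl] using this

theorem pvKoordinatDict_contains (s : String) (c : Char) :
    (pvKoordinatDict s).contains (String.singleton c)
      = PySem.Set.contains (PySem.Set.ofList s.toList) c := by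
  rw [PySem.Dict.contains_eq_decide_mem_keys, pvKoordinatDict_keys]
  by_cases h : c ∈ PySem.Set.ofList s.toList
  · simp [PySem.Set.contains, List.mem_map, pvSing_inj, h,
      (PySem.Set.mem_ofList s.toList c).mp h]
  · have h2 : c ∉ s.toList := fun hh => h ((PySem.Set.mem_ofList s.toList c).mpr hh)
    simp [PySem.Set.contains, List.mem_map, pvSing_inj, h, h2]

theorem pvKoordinatDict_getD (s : String) (c : Char) :
    (pvKoordinatDict s).getD (String.singleton c) [] = pvKonumlar s.toList c := by
  unfold pvKoordinatDict
  rw [pvGetD_A, PySem.Dict.getD_empty, pvKonumlar_eq]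
  simp

-- ===== VERDICT (by name: the statement is the Claim_ definition above) =====
theorem karakterKoordinatlariniBul_spec : Claim_equal_karakterKoordinatlariniBul := by
  intro s1 s2 _
  unfold Spec_karakterKoordinatlariniBul
  unfold karakterKoordinatlariniBul karakterKoordinatlariniBul_alt
  simp only []
  -- A side
  rw [pvOrtak_A (fun k => (pvKoordinatDict s2).contains k)
      (fun k => [("dosya1 Koordinatlari", (pvKoordinatDict s1).getD k []),
                 ("dosya2 Koordinatlari", (pvKoordinatDict s2).getD k [])])
      (pvKoordinatDict s1).keys PySem.Dict.empty
      (by rw [pvKoordinatDict_keys]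
          exact (PySem.Set.nodup_ofList s1.toList).map pvSing_injective)
      (fun k _ => PySem.Dict.contains_empty k)]
  -- B side
  rw [pvB_items (fun c => PySem.Set.contains (PySem.Set.ofList s2.toList) c)
      (fun c => [("dosya1 Koordinatlari", pvKonumlar s1.toList c),
                 ("dosya2 Koordinatlari", pvKonumlar s2.toList c)])
      s1.toList PySem.Dict.empty []
      (by rw [PySem.Dict.keys_empty]; exact List.nodup_nil)
      (fun c => PySem.Dict.contains_empty _)]
  rw [pvPick_eq _ s1.toList [] [] (fun c _ => Iff.rfl)]
  simp only [List.drop_zero, List.length_nil]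
  rw [← PySem.Set.ofList_eq_foldl]
  -- now reduce the A side to the same normal form
  rw [pvKoordinatDict_keys, List.filter_map, List.map_map]
  have hfilter : ((fun k => (pvKoordinatDict s2).contains k) ∘ String.singleton)
      = fun c => PySem.Set.contains (PySem.Set.ofList s2.toList) c := by
    funext c
    exact pvKoordinatDict_contains s2 c
  rw [hfilter]
  exact List.map_congr_left (fun c _ => by simp [Function.comp, pvKoordinatDict_getD])
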